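-- pv_equiv track=rewrite | github.com/lahwran/dotfiles | dotfiles/wrap_process.py | de_ret
-- ===== SOURCE A (Python) =====
-- def de_ret(line):
--     thelist = []
--     index = 0
--     for char in line:
--         if char == "\r":
--             index = 0
--             continue
--         if index == len(thelist):
--             thelist.append(char)
--         else:
--             thelist[index] = char
--         index += 1
--     return "".join(thelist)
-- ===== SOURCE B (Python) =====
-- def de_ret(line):
--     segments = line.split("\r")
--     n = max(map(len, segments))
--     rsegs = segments[::-1]
--     out = []
--     for i in range(n):
--         for seg in rsegs:
--             if i < len(seg):
--                 out.append(seg[i])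
--                 break
--     return "".join(out)
-- ===== Notes on version B (the rewrite author's own statement) =====
-- stated objective: alternative
-- what changed: Instead of A's single stateful scan that resets a write index on each '\r' and overwrites in place, B splits the line on '\r' into segments and fills each output position (up to the maximum segment length) from the last segment that covers it, scanning the reversed segment list.
import Mathlib
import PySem

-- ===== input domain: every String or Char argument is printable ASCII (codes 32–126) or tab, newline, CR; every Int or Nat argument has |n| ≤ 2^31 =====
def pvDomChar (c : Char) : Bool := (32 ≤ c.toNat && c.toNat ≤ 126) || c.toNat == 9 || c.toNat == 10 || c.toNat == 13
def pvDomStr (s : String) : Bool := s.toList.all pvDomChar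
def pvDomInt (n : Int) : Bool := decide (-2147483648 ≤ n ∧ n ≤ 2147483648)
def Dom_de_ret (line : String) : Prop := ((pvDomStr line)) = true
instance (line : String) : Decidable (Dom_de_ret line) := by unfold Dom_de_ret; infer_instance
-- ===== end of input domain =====

-- B re-implements de_ret by splitting on "\r" and filling each output position from the last
-- segment that covers it (alternative decomposition, not claimed faster); A's single stateful scan.

-- ===== PORT A =====
-- A-side helper: the body of A's for-loop (reset index on '\r'; append or overwrite otherwise)
def pvStepA (st : List Char × Nat) (c : Char) : List Char × Nat :=
  if c = '\r' then (st.1, 0)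
  else if st.2 = st.1.length then (st.1 ++ [c], st.2 + 1)
  else (st.1.set st.2 c, st.2 + 1)

-- literal port of A: one left fold over the characters carrying (thelist, index)
def de_ret (line : String) : String :=
  String.ofList (line.toList.foldl pvStepA ([], 0)).1

-- ===== PORT B =====
-- port of Source B: split on '\r' (line.split("\r") ported as List.splitOn), n = max segment length,
-- then for each position i take the char of the first segment of the reversed list covering i
def de_ret_alt (line : String) : String :=
  let segments := line.toList.splitOn '\r'
  let n := (segments.map List.length).foldl max 0
  let rsegs := segments.reverse
  let out := (List.range n).foldl
    (fun out i =>
      match rsegs.find? (fun s => decide (i < s.length)) with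
      | some s => out ++ (PySem.List.pyGet? s (i : Int)).toList
      | none => out)
    ([] : List Char)
  String.ofList out

-- ===== PRECONDITION & SPEC =====
def Spec_de_ret (line : String) (out : String) : Prop := out = de_ret_alt line
instance (line : String) (out : String) : Decidable (Spec_de_ret line out) := by unfold Spec_de_ret; infer_instance

-- ===== CLAIM (what is proved, stated in full; the proofs are below) =====
def Claim_equal_de_ret : Prop := ∀ (line : String), Dom_de_ret line → Spec_de_ret line (de_ret line)

-- ===== LEMMAS AND PROOFS =====

-- overlay: the effect of A's inner loop on one CR-free segment starting at index 0
def pvOv (acc seg : List Char) : List Char := seg ++ acc.drop seg.length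

theorem pvStepA_no_cr (acc : List Char) (i : Nat) (c : Char) (hc : c ≠ '\r') (hi : i ≤ acc.length) :
    pvStepA (acc, i) c = (acc.take i ++ c :: acc.drop (i + 1), i + 1) := by
  simp only [pvStepA, if_neg hc]
  rcases Nat.lt_or_eq_of_le hi with h | h
  · rw [if_neg (by omega)]
    simp [List.set_eq_take_append_cons_drop, h]
  · rw [if_pos h, h, List.take_length, List.drop_eq_nil_of_le (by omega)]

theorem pvFoldA_seg (seg : List Char) (hseg : '\r' ∉ seg) :
    ∀ (acc : List Char) (i : Nat), i ≤ acc.length →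
      seg.foldl pvStepA (acc, i) =
        (acc.take i ++ seg ++ acc.drop (i + seg.length), i + seg.length) := by
  induction seg with
  | nil => intro acc i hi; simp
  | cons c cs ih =>
    intro acc i hi
    have hc : c ≠ '\r' := fun h => hseg (h ▸ List.mem_cons_self ..)
    have hcs : '\r' ∉ cs := fun h => hseg (List.mem_cons_of_mem _ h)
    rw [List.foldl_cons, pvStepA_no_cr acc i c hc hi]
    have hsplit : acc.take i ++ c :: acc.drop (i + 1)
        = (acc.take i ++ [c]) ++ acc.drop (i + 1) := by simp
    have hlen1 : (acc.take i ++ [c]).length = i + 1 := by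
      simp [List.length_take, Nat.min_eq_left hi]
    rw [ih hcs _ (i+1) (by simp [List.length_take]; omega)]
    have h1 : (acc.take i ++ c :: acc.drop (i + 1)).take (i+1) = acc.take i ++ [c] := by
      rw [hsplit, ← hlen1, List.take_left]
    have h2 : (acc.take i ++ c :: acc.drop (i + 1)).drop (i + 1 + cs.length)
        = acc.drop (i + 1 + cs.length) := by
      rw [hsplit, List.drop_append, List.drop_eq_nil_of_le (by omega), List.drop_drop, hlen1]
      simp
    rw [h1, h2]
    simp
    omega

theorem pvFoldA_intercalate (segs : List (List Char))
    (hsegs : ∀ s ∈ segs, '\r' ∉ s) :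
    ∀ acc : List Char,
      ((List.intercalate ['\r'] segs).foldl pvStepA (acc, 0)).1 = segs.foldl pvOv acc := by
  induction segs with
  | nil => intro acc; simp [List.intercalate]
  | cons s rest ih =>
    intro acc
    have hs : '\r' ∉ s := hsegs s (List.mem_cons_self ..)
    have hrest : ∀ t ∈ rest, '\r' ∉ t := fun t ht => hsegs t (List.mem_cons_of_mem _ ht)
    cases rest with
    | nil =>
      simp only [List.intercalate, List.intersperse, List.flatten, List.append_eq,
        List.append_nil]
      rw [pvFoldA_seg s hs acc 0 (Nat.zero_le _)]
      simp [pvOv]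
    | cons t rest' =>
      have : List.intercalate ['\r'] (s :: t :: rest')
          = s ++ '\r' :: List.intercalate ['\r'] (t :: rest') := by
        simp [List.intercalate]
      rw [this, List.foldl_append, pvFoldA_seg s hs acc 0 (Nat.zero_le _), List.foldl_cons]
      have hstep : pvStepA (List.take 0 acc ++ s ++ List.drop (0 + s.length) acc, 0 + s.length) '\r'
          = (pvOv acc s, 0) := by
        simp [pvStepA, pvOv]
      rw [hstep, ih hrest]
      simp

theorem pvSplitOnP_not_p {α : Type} (p : α → Bool) (l : List α) :
    ∀ s ∈ l.splitOnP p, ∀ a ∈ s, ¬ p a := by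
  induction l with
  | nil => intro s hs a ha; simp [List.splitOnP_nil] at hs; subst hs; simp at ha
  | cons x xs ih =>
    intro s hs a ha
    rw [List.splitOnP_cons] at hs
    by_cases hx : p x
    · rw [if_pos hx] at hs
      rcases List.mem_cons.mp hs with h | h
      · subst h; simp at ha
      · exact ih s h a ha
    · rw [if_neg (by simpa using hx)] at hs
      obtain ⟨h, t, hht⟩ : ∃ h t, xs.splitOnP p = h :: t := by
        cases hxs : xs.splitOnP p with
        | nil => exact absurd hxs (List.splitOnP_ne_nil p xs)
        | cons h t => exact ⟨h, t, rfl⟩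
      rw [hht] at hs
      simp only [List.modifyHead] at hs
      rcases List.mem_cons.mp hs with h1 | h1
      · subst h1
        rcases List.mem_cons.mp ha with h2 | h2
        · subst h2; exact fun hp => hx hp
        · exact ih h (hht ▸ List.mem_cons_self ..) a h2
      · exact ih s (hht ▸ List.mem_cons_of_mem _ h1) a ha

theorem pvSplitOn_no_cr (l : List Char) : ∀ s ∈ l.splitOn '\r', '\r' ∉ s := by
  intro s hs hmem
  have := pvSplitOnP_not_p (fun a => a == '\r') l s (by simpa [List.splitOn] using hs) _ hmem
  simp at this

theorem pvLen_ov (acc seg : List Char) : (pvOv acc seg).length = max acc.length seg.length := by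
  simp [pvOv]; omega

theorem pvLen_foldl_ov (segs : List (List Char)) :
    (segs.foldl pvOv []).length = ((segs.map List.length).foldl max 0) := by
  induction segs using List.reverseRecOn with
  | nil => simp
  | append_singleton segs s ih =>
    rw [List.foldl_append, List.map_append, List.foldl_append]
    simp [pvLen_ov, ih]

theorem pvGet_foldl_ov (segs : List (List Char)) (i : Nat) :
    (segs.foldl pvOv [])[i]? =
      (segs.reverse.find? (fun s => decide (i < s.length))).bind (fun s => s[i]?) := by
  induction segs using List.reverseRecOn with
  | nil => simp
  | append_singleton segs s ih =>
    rw [List.foldl_append, List.foldl_cons, List.foldl_nil, List.reverse_append]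
    simp only [List.reverse_singleton, List.singleton_append, List.find?_cons]
    by_cases hi : i < s.length
    · rw [show (decide (i < s.length)) = true by simpa using hi]
      simp only [pvOv, Option.bind_some]
      rw [List.getElem?_append_left hi]
    · rw [show (decide (i < s.length)) = false by simpa using hi]
      simp only [pvOv]
      rw [List.getElem?_append_right (by omega), List.getElem?_drop]
      rw [show s.length + (i - s.length) = i by omega]
      exact ih

theorem pvFlat (L : List Char) :
    (List.range L.length).flatMap (fun i => (L[i]?).toList) = L := by
  induction L using List.reverseRecOn with
  | nil => simp
  | append_singleton L a ih =>
    rw [List.length_append, List.length_singleton, List.range_succ, List.flatMap_append]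
    have h1 : (List.range L.length).flatMap (fun i => ((L ++ [a])[i]?).toList)
        = (List.range L.length).flatMap (fun i => (L[i]?).toList) := by
      simp only [List.flatMap_def]
      congr 1
      exact List.map_congr_left (fun i hi => by
        rw [List.getElem?_append_left (List.mem_range.mp hi)])
    rw [h1, ih]
    simp

theorem pvMain (line : String) : de_ret line = de_ret_alt line := by
  unfold de_ret de_ret_alt
  have hno := pvSplitOn_no_cr line.toList
  have hsplit : List.intercalate ['\r'] (line.toList.splitOn '\r') = line.toList :=
    List.intercalate_splitOn _ _
  set segs := line.toList.splitOn '\r' with hsegs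
  set L := segs.foldl pvOv [] with hL
  have hA : (line.toList.foldl pvStepA ([], 0)).1 = L := by
    rw [← hsplit]; exact pvFoldA_intercalate segs hno []
  have hfun : ∀ (out : List Char) (i : Nat),
      (match segs.reverse.find? (fun s => decide (i < s.length)) with
       | some s => out ++ (PySem.List.pyGet? s (i : Int)).toList
       | none => out)
      = out ++ (L[i]?).toList := by
    intro out i
    rw [pvGet_foldl_ov segs i]
    cases hf : segs.reverse.find? (fun s => decide (i < s.length)) with
    | none => simp
    | some s => simp
  have hfold : (List.range ((segs.map List.length).foldl max 0)).foldl
      (fun out i =>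
        match segs.reverse.find? (fun s => decide (i < s.length)) with
        | some s => out ++ (PySem.List.pyGet? s (i : Int)).toList
        | none => out) ([] : List Char) = L := by
    simp only [hfun]
    rw [PySem.List.foldl_append_eq_flatMap]
    rw [← pvLen_foldl_ov segs, ← hL]
    simpa using pvFlat L
  rw [hA, ← hfold]

-- ===== VERDICT (by name: the statement is the Claim_ definition above) =====
theorem de_ret_spec : Claim_equal_de_ret := by
  intro line _
  unfold Spec_de_ret
  exact pvMain line
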